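-- pv_equiv track=rewrite | github.com/Yuxuannie/DeckGen | core/principle_engine/selector.py | _closest_matches
-- ===== SOURCE A (Python) =====
-- def _closest_matches(
--     arc_type: str,
--     topology: str,
--     registry: dict,
--     limit: int = 3,
-- ) -> list:
--     """Find closest partial matches in registry for diagnostic output."""
--     arc = (arc_type or "").lower()
--     candidates = []
--
--     for key in registry:
--         parts = key.split("/")
--         score = 0
--         if parts[0] == arc:
--             score += 2
--         if len(parts) > 1 and topology in parts[1]:
--             score += 1
--         if score > 0:
--             candidates.append((score, key))
--
--     candidates.sort(key=lambda x: -x[0])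
--     return [k for _, k in candidates[:limit]]
-- ===== SOURCE B (Python) =====
-- def _closest_matches(
--     arc_type: str,
--     topology: str,
--     registry: dict,
--     limit: int = 3,
-- ) -> list:
--     """Single-pass bucket version: no scores, no sort; three buckets in insertion order."""
--     arc = (arc_type or "").lower()
--     b3, b2, b1 = [], [], []
--     for key in registry:
--         parts = key.split("/")
--         if len(parts) > 1 and topology in parts[1]:
--             (b3 if parts[0] == arc else b1).append(key)
--         elif parts[0] == arc:
--             b2.append(key)
--     return (b3 + b2 + b1)[:limit]
-- ===== Notes on version B (the rewrite author's own statement) =====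
-- stated objective: alternative
-- what changed: replaces the score-and-sort pipeline (build (score,key) pairs, stable sort by descending score, slice, project) by a single pass that drops keys into three buckets (arc+topology hit, arc only, topology only) and concatenates them, exploiting that only scores 3/2/1 occur and the sort is stable
import Mathlib
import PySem

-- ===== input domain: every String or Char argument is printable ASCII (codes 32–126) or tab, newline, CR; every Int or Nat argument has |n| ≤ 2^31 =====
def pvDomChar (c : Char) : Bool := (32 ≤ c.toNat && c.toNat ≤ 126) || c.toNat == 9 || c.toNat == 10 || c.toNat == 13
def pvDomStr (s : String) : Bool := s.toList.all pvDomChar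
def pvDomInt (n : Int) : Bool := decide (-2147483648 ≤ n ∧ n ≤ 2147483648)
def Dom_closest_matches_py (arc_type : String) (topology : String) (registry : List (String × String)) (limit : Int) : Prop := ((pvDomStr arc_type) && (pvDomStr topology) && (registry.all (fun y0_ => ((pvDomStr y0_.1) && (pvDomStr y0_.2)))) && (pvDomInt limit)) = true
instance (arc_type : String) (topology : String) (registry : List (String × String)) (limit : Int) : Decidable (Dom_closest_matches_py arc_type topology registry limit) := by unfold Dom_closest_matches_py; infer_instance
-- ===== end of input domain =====

-- B replaces A's score-building + stable sort by one bucketing pass (only scores 3/2/1 occur and the sort is stable).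

-- ===== PORT A =====
-- score of one key exactly as A computes it (the two += branches, in order; key.split("/") with "/" ≠ "" never raises)
def pvScoreA (arc : String) (topology : String) (key : String) : Int :=
  let parts := (PySem.Str.split? key "/").getD []
  let score : Int := if PySem.List.pyGetD parts 0 "" == arc then 2 else 0
  if decide (parts.length > 1) && PySem.Str.isIn topology (PySem.List.pyGetD parts 1 "") then score + 1 else score

def closest_matches_py (arc_type : String) (topology : String) (registry : List (String × String)) (limit : Int) : List String :=
  let arc := PySem.Str.lower (if arc_type == "" then "" else arc_type)
  let candidates := registry.foldl (fun cand kv =>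
    if pvScoreA arc topology kv.1 > 0 then cand ++ [(pvScoreA arc topology kv.1, kv.1)] else cand) []
  let sortedC := PySem.List.sorted candidates (fun x => -x.1) false
  (PySem.List.slice sortedC none (some limit)).map (fun p => p.2)

-- ===== PORT B =====
-- B-side helpers: the two membership tests of one key
def pvArcHit (arc : String) (key : String) : Bool :=
  PySem.List.pyGetD ((PySem.Str.split? key "/").getD []) 0 "" == arc
def pvTopoHit (topology : String) (key : String) : Bool :=
  let parts := (PySem.Str.split? key "/").getD []
  decide (parts.length > 1) && PySem.Str.isIn topology (PySem.List.pyGetD parts 1 "")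

def closest_matches_py_alt (arc_type : String) (topology : String) (registry : List (String × String)) (limit : Int) : List String :=
  let arc := PySem.Str.lower (if arc_type == "" then "" else arc_type)
  let bs := registry.foldl (fun (bs : List String × List String × List String) kv =>
    if pvTopoHit topology kv.1 then
      (if pvArcHit arc kv.1 then (bs.1 ++ [kv.1], bs.2.1, bs.2.2) else (bs.1, bs.2.1, bs.2.2 ++ [kv.1]))
    else if pvArcHit arc kv.1 then (bs.1, bs.2.1 ++ [kv.1], bs.2.2) else bs) ([], [], [])
  PySem.List.slice (bs.1 ++ bs.2.1 ++ bs.2.2) none (some limit)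

-- ===== PRECONDITION & SPEC =====
def Spec_closest_matches_py (arc_type : String) (topology : String) (registry : List (String × String)) (limit : Int) (out : List String) : Prop := out = closest_matches_py_alt arc_type topology registry limit
instance (arc_type : String) (topology : String) (registry : List (String × String)) (limit : Int) (out : List String) : Decidable (Spec_closest_matches_py arc_type topology registry limit out) := by unfold Spec_closest_matches_py; infer_instance

-- ===== CLAIM (what is proved, stated in full; the proofs are below) =====
def Claim_equal_closest_matches_py : Prop := ∀ (arc_type : String) (topology : String) (registry : List (String × String)) (limit : Int), Dom_closest_matches_py arc_type topology registry limit → Spec_closest_matches_py arc_type topology registry limit (closest_matches_py arc_type topology registry limit)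

-- ===== LEMMAS AND PROOFS =====

theorem pvScoreA_eq (arc topology key : String) :
    pvScoreA arc topology key
      = (if pvArcHit arc key then 2 else 0) + (if pvTopoHit topology key then 1 else 0) := by
  simp only [pvScoreA, pvArcHit, pvTopoHit]
  split_ifs <;> simp_all

theorem pv_insertBy_append_left {α : Type} (before : α → α → Bool) (x : α) (l r : List α)
    (h : ∀ y ∈ l, before x y = false) :
    PySem.List.insertBy before x (l ++ r) = l ++ PySem.List.insertBy before x r := by
  induction l with
  | nil => simp
  | cons a t ih =>
    simp only [List.cons_append, PySem.List.insertBy]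
    rw [h a (by simp), ih (fun y hy => h y (by simp [hy]))]
    simp

theorem pv_insertBy_all_before {α : Type} (before : α → α → Bool) (x : α) (r : List α)
    (h : ∀ y ∈ r, before x y = true) :
    PySem.List.insertBy before x r = x :: r := by
  cases r with
  | nil => rfl
  | cons a t => simp [PySem.List.insertBy, h a (by simp)]

-- the bucket invariant of A's stable insertion sort when only scores 3, 2, 1 occur
theorem pv_sort_buckets (l : List (Int × String)) (a3 a2 a1 : List (Int × String))
    (hl : ∀ x ∈ l, x.1 = 1 ∨ x.1 = 2 ∨ x.1 = 3)
    (h3 : ∀ x ∈ a3, x.1 = 3) (h2 : ∀ x ∈ a2, x.1 = 2) (h1 : ∀ x ∈ a1, x.1 = 1) :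
    l.foldl (fun acc x => PySem.List.insertBy (fun a b => decide ((fun y : Int × String => -y.1) a < (fun y : Int × String => -y.1) b)) x acc) (a3 ++ a2 ++ a1)
      = (a3 ++ l.filter (fun x => x.1 == 3)) ++ (a2 ++ l.filter (fun x => x.1 == 2)) ++ (a1 ++ l.filter (fun x => x.1 == 1)) := by
  induction l generalizing a3 a2 a1 with
  | nil => simp
  | cons x t ih =>
    have hx := hl x (by simp)
    simp only [List.foldl_cons]
    rcases hx with hx | hx | hx
    · -- score 1: goes after everything
      rw [show a3 ++ a2 ++ a1 = (a3 ++ a2 ++ a1) ++ ([] : List (Int × String)) by simp,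
          pv_insertBy_append_left _ x _ _ (by
            intro y hy
            simp only [List.mem_append] at hy
            rcases hy with (hy | hy) | hy
            · have := h3 y hy; simp [this, hx]
            · have := h2 y hy; simp [this, hx]
            · have := h1 y hy; simp [this, hx])]
      simp only [PySem.List.insertBy, List.append_assoc]
      rw [show a3 ++ (a2 ++ (a1 ++ [x])) = a3 ++ a2 ++ (a1 ++ [x]) by simp]
      rw [ih a3 a2 (a1 ++ [x]) (fun y hy => hl y (by simp [hy])) h3 h2
            (by intro y hy; rcases List.mem_append.1 hy with hy | hy
                · exact h1 y hy
                · simp at hy; simp [hy, hx])]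
      simp [hx]
    · -- score 2: after a3 and a2, before a1
      rw [show a3 ++ a2 ++ a1 = (a3 ++ a2) ++ a1 by simp,
          pv_insertBy_append_left _ x _ _ (by
            intro y hy
            rcases List.mem_append.1 hy with hy | hy
            · have := h3 y hy; simp [this, hx]
            · have := h2 y hy; simp [this, hx]),
          pv_insertBy_all_before _ x a1 (by intro y hy; have := h1 y hy; simp [this, hx])]
      rw [show (a3 ++ a2) ++ (x :: a1) = a3 ++ (a2 ++ [x]) ++ a1 by simp]
      rw [ih a3 (a2 ++ [x]) a1 (fun y hy => hl y (by simp [hy])) h3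
            (by intro y hy; rcases List.mem_append.1 hy with hy | hy
                · exact h2 y hy
                · simp at hy; simp [hy, hx]) h1]
      simp [hx]
    · -- score 3: after a3, before a2 ++ a1
      rw [show a3 ++ a2 ++ a1 = a3 ++ (a2 ++ a1) by simp,
          pv_insertBy_append_left _ x _ _ (by intro y hy; have := h3 y hy; simp [this, hx]),
          pv_insertBy_all_before _ x (a2 ++ a1) (by
            intro y hy
            rcases List.mem_append.1 hy with hy | hy
            · have := h2 y hy; simp [this, hx]
            · have := h1 y hy; simp [this, hx])]
      rw [show a3 ++ (x :: (a2 ++ a1)) = (a3 ++ [x]) ++ a2 ++ a1 by simp]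
      rw [ih (a3 ++ [x]) a2 a1 (fun y hy => hl y (by simp [hy]))
            (by intro y hy; rcases List.mem_append.1 hy with hy | hy
                · exact h3 y hy
                · simp at hy; simp [hy, hx]) h2 h1]
      simp [hx]

theorem pv_map_slice {α β : Type} (g : α → β) (xs : List α) (b : Int) :
    (PySem.List.slice xs none (some b)).map g = PySem.List.slice (xs.map g) none (some b) := by
  simp [PySem.List.slice, PySem.List.clampIdx, List.map_take]

-- B's fold produces the three filtered bucket lists
theorem pv_alt_fold (arc topology : String) (registry : List (String × String))
    (b3 b2 b1 : List String) :
    registry.foldl (fun (bs : List String × List String × List String) kv =>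
      if pvTopoHit topology kv.1 then
        (if pvArcHit arc kv.1 then (bs.1 ++ [kv.1], bs.2.1, bs.2.2) else (bs.1, bs.2.1, bs.2.2 ++ [kv.1]))
      else if pvArcHit arc kv.1 then (bs.1, bs.2.1 ++ [kv.1], bs.2.2) else bs) (b3, b2, b1)
      = (b3 ++ (registry.filter (fun kv => pvArcHit arc kv.1 && pvTopoHit topology kv.1)).map (·.1),
         b2 ++ (registry.filter (fun kv => pvArcHit arc kv.1 && !pvTopoHit topology kv.1)).map (·.1),
         b1 ++ (registry.filter (fun kv => !pvArcHit arc kv.1 && pvTopoHit topology kv.1)).map (·.1)) := by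
  induction registry generalizing b3 b2 b1 with
  | nil => simp
  | cons kv t ih =>
    simp only [List.foldl_cons, List.filter_cons]
    by_cases ha : pvArcHit arc kv.1 <;> by_cases ht : pvTopoHit topology kv.1 <;>
      simp [ha, ht, ih]

theorem closest_matches_eq (arc_type topology : String) (registry : List (String × String)) (limit : Int) :
    closest_matches_py arc_type topology registry limit
      = closest_matches_py_alt arc_type topology registry limit := by
  unfold closest_matches_py closest_matches_py_alt
  set arc := PySem.Str.lower (if arc_type == "" then "" else arc_type) with harc
  -- A's candidate list as a filtered map
  have hA : registry.foldl (fun cand kv =>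
      if pvScoreA arc topology kv.1 > 0 then cand ++ [(pvScoreA arc topology kv.1, kv.1)] else cand) []
      = List.map (fun kv : String × String => (pvScoreA arc topology kv.1, kv.1))
          (registry.filter (fun kv => decide (pvScoreA arc topology kv.1 > 0))) := by
    simpa using PySem.List.foldl_append_if
      (fun kv : String × String => decide (pvScoreA arc topology kv.1 > 0))
      (fun kv : String × String => (pvScoreA arc topology kv.1, kv.1)) registry []
  simp only [hA]
  rw [PySem.List.sorted, if_neg (by simp)]
  set l := List.map (fun kv : String × String => (pvScoreA arc topology kv.1, kv.1))
      (registry.filter (fun kv => decide (pvScoreA arc topology kv.1 > 0))) with hldef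
  have hscore : ∀ kv : String × String, pvScoreA arc topology kv.1 =
      (if pvArcHit arc kv.1 then 2 else 0) + (if pvTopoHit topology kv.1 then 1 else 0) :=
    fun kv => pvScoreA_eq arc topology kv.1
  have hl : ∀ x ∈ l, x.1 = 1 ∨ x.1 = 2 ∨ x.1 = 3 := by
    intro x hx
    rw [hldef] at hx
    simp only [List.mem_map, List.mem_filter] at hx
    obtain ⟨kv, ⟨_, hpos⟩, rfl⟩ := hx
    rw [hscore kv] at hpos ⊢
    simp at hpos
    split_ifs at hpos ⊢ <;> omega
  have hsorted := pv_sort_buckets l [] [] [] hl (by simp) (by simp) (by simp)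
  simp only [List.nil_append, List.append_nil] at hsorted
  rw [hsorted, pv_alt_fold, pv_map_slice]
  congr 1
  simp only [List.nil_append]
  -- identify the three filtered blocks, score by score
  have hf : ∀ (s : Int) (pb : Bool → Bool → Bool), s ≠ 0 →
      (∀ a t : Bool, ((if a then 2 else 0) + (if t then 1 else 0) = s) ↔ pb a t = true) →
      (l.filter (fun x => x.1 == s)).map (fun p => p.2)
        = (registry.filter (fun kv => pb (pvArcHit arc kv.1) (pvTopoHit topology kv.1))).map (·.1) := by
    intro s pb hs hpb
    rw [hldef]
    rw [List.filter_map, List.filter_filter, List.map_map]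
    congr 1
    apply List.filter_congr
    intro kv _
    have := hpb (pvArcHit arc kv.1) (pvTopoHit topology kv.1)
    rw [Bool.eq_iff_iff]
    simp only [Function.comp, hscore kv, Bool.and_eq_true, decide_eq_true_eq, beq_iff_eq]
    rw [← this]
    split_ifs <;> omega
  simp only [List.map_append]
  rw [hf 3 (fun a t => a && t) (by omega) (by intro a t; cases a <;> cases t <;> simp),
      hf 2 (fun a t => a && !t) (by omega) (by intro a t; cases a <;> cases t <;> simp),
      hf 1 (fun a t => !a && t) (by omega) (by intro a t; cases a <;> cases t <;> simp)]

-- ===== VERDICT (by name: the statement is the Claim_ definition above) =====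
theorem closest_matches_py_spec : Claim_equal_closest_matches_py := by
  intro arc_type topology registry limit _
  unfold Spec_closest_matches_py
  exact closest_matches_eq arc_type topology registry limit
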